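-- pv_equiv track=rewrite | github.com/cmahnke/windows-deployer | docker/vpnconnect/scripts/run.py | group_args
-- ===== SOURCE A (Python) =====
-- def group_args(argv, modules):
--     current_subcmd = 0
--     subcmds = []
--     subcmds.append([])
--     for a in argv:
--         if a in modules.keys():
--             current_subcmd += 1
--             subcmds.append([])
--         subcmds[current_subcmd].append(a)
--     if len(subcmds) == 1:
--         return [subcmds[0]]
--     elif len(subcmds) == 2:
--         return [subcmds[0] + subcmds[1]]
--     else:
--         return [subcmds[0] + subcmds[1], *subcmds[2:]]
-- ===== SOURCE B (Python) =====
-- def group_args(argv, modules):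
--     argv = list(argv)
--     n = len(argv)
--     cuts = [i for i in range(n) if argv[i] in modules]
--     if len(cuts) < 2:
--         return [argv]
--     starts = cuts[1:]
--     ends = cuts[2:] + [n]
--     return [argv[:starts[0]]] + [argv[s:e] for s, e in zip(starts, ends)]
-- ===== Notes on version B (the rewrite author's own statement) =====
-- stated objective: simpler
-- what changed: Replaces A's incremental element-by-element append into a growing list of sublists (plus a final merge of the first two) by a single scan that records the cut indices where an argument is a module key, followed by direct slicing of argv at those cuts.
import Mathlib
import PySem

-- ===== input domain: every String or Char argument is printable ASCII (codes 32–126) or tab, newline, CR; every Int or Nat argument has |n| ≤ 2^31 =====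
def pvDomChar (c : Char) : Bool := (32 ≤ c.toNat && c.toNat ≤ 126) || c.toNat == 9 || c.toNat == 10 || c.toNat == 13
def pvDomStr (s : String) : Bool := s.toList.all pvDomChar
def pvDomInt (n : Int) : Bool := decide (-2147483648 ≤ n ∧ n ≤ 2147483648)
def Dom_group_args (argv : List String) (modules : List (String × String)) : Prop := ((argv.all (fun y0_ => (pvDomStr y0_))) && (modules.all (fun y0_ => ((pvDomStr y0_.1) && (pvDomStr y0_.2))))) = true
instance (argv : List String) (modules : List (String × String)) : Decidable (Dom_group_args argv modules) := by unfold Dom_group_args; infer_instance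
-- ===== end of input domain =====

-- B replaces A's element-by-element accumulation into a growing list of sublists by a
-- cut-index scan followed by direct slicing (objective: simpler decomposition).

-- ===== PORT A =====
-- one iteration of A's for-loop; state = (current_subcmd, subcmds)
def gaStep (p : String → Bool) (st : Nat × List (List String)) (a : String) : Nat × List (List String) :=
  if p a then
    (st.1 + 1, (st.2 ++ [[]]).modify (st.1 + 1) (fun g => g ++ [a]))
  else
    (st.1, st.2.modify st.1 (fun g => g ++ [a]))

def group_args (argv : List String) (modules : List (String × String)) : List (List String) :=
  let keys := PySem.Dict.keys (PySem.Dict.ofList modules)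
  let st := argv.foldl (gaStep (fun a => keys.contains a)) (0, [[]])
  let subs := st.2
  if subs.length = 1 then [subs.getD 0 []]
  else if subs.length = 2 then [subs.getD 0 [] ++ subs.getD 1 []]
  else (subs.getD 0 [] ++ subs.getD 1 []) :: subs.drop 2

-- ===== PORT B =====
-- cuts = [i for i in range(len(argv)) if argv[i] in modules]; getD with default "" is exact since i < len(argv)
def gaCuts (argv : List String) (p : String → Bool) : List Nat :=
  (List.range argv.length).filter (fun i => p (argv.getD i ""))

def group_args_alt (argv : List String) (modules : List (String × String)) : List (List String) :=
  let keys := PySem.Dict.keys (PySem.Dict.ofList modules)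
  let cuts := gaCuts argv (fun a => keys.contains a)
  if cuts.length < 2 then [argv]
  else
    let starts := cuts.drop 1
    let ends := cuts.drop 2 ++ [argv.length]
    argv.take (starts.headD 0) :: (starts.zip ends).map (fun q => (argv.drop q.1).take (q.2 - q.1))

-- ===== PRECONDITION & SPEC =====
def Spec_group_args (argv : List String) (modules : List (String × String)) (out : List (List String)) : Prop := out = group_args_alt argv modules
instance (argv : List String) (modules : List (String × String)) (out : List (List String)) : Decidable (Spec_group_args argv modules out) := by unfold Spec_group_args; infer_instance

-- ===== CLAIM (what is proved, stated in full; the proofs are below) =====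
def Claim_equal_group_args : Prop := ∀ (argv : List String) (modules : List (String × String)), Dom_group_args argv modules → Spec_group_args argv modules (group_args argv modules)

-- ===== LEMMAS AND PROOFS =====

-- the groups that A's loop builds after the first, expressed by slicing at the cut positions
def chunksAux (argv : List String) : List Nat → List (List String)
  | [] => []
  | [c] => [argv.drop c]
  | c :: c' :: rest => ((argv.drop c).take (c' - c)) :: chunksAux argv (c' :: rest)

theorem length_chunksAux (argv : List String) : ∀ c : List Nat, (chunksAux argv c).length = c.length
  | [] => rfl
  | [_] => rfl
  | _ :: c' :: rest => by
      simp [chunksAux, length_chunksAux argv (c' :: rest)]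

theorem mem_gaCuts_lt {argv : List String} {p : String → Bool} {c : Nat}
    (h : c ∈ gaCuts argv p) : c < argv.length := by
  unfold gaCuts at h
  exact List.mem_range.mp (List.mem_of_mem_filter h)

theorem gaCuts_sorted (argv : List String) (p : String → Bool) :
    (gaCuts argv p).Pairwise (· < ·) :=
  List.Pairwise.filter _ List.pairwise_lt_range

theorem gaCuts_snoc (argv : List String) (a : String) (p : String → Bool) :
    gaCuts (argv ++ [a]) p = gaCuts argv p ++ (if p a then [argv.length] else []) := by
  unfold gaCuts
  rw [List.length_append, List.length_cons, List.length_nil, List.range_succ, List.filter_append]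
  congr 1
  · exact List.filter_congr fun i hi => by
      rw [List.getD_append _ _ _ _ (List.mem_range.mp hi)]
  · have hg : (argv ++ [a])[argv.length]?.getD "" = a := by simp
    rcases hpa : p a <;> simp [List.filter, List.getD, hpa]

theorem modify_last {α : Type} (f : α → α) : ∀ (xs : List α) (y : α),
    (xs ++ [y]).modify xs.length f = xs ++ [f y]
  | [], y => rfl
  | x :: xs, y => by
      simpa [List.modify_cons] using modify_last f xs y

theorem modify_at_length {α : Type} (f : α → α) (xs : List α) (y : α) (n : Nat)
    (h : n = xs.length) : (xs ++ [y]).modify n f = xs ++ [f y] := by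
  subst h; exact modify_last f xs y

theorem chunksAux_snoc_no (argv : List String) (a : String) :
    ∀ c : List Nat, (∀ x ∈ c, x ≤ argv.length) → c ≠ [] →
      chunksAux (argv ++ [a]) c = (chunksAux argv c).modify (c.length - 1) (fun g => g ++ [a])
  | [], _, hne => absurd rfl hne
  | [c], hb, _ => by
      simp [chunksAux, List.drop_append_of_le_length (hb c (by simp)), List.modify_cons]
  | c :: c' :: rest, hb, _ => by
      have htake : ((argv ++ [a]).drop c).take (c' - c) = (argv.drop c).take (c' - c) := by
        rw [List.drop_append_of_le_length (hb c (by simp)),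
            List.take_append_of_le_length (by simp; have := hb c' (by simp); omega)]
      have htail := chunksAux_snoc_no argv a (c' :: rest)
        (fun x hx => hb x (List.mem_cons_of_mem _ hx)) (by simp)
      simp only [chunksAux, List.length_cons, htake]
      rw [htail, List.modify_cons, if_neg (by omega)]
      simp

theorem chunksAux_snoc_yes (argv : List String) (a : String) :
    ∀ c : List Nat, (∀ x ∈ c, x ≤ argv.length) →
      chunksAux (argv ++ [a]) (c ++ [argv.length]) = chunksAux argv c ++ [[a]]
  | [], _ => by
      simp [chunksAux, List.drop_append_of_le_length (Nat.le_refl _)]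
  | [c], hb => by
      have hc : c ≤ argv.length := hb c (by simp)
      have h1 : (argv ++ [a]).drop c = argv.drop c ++ [a] :=
        List.drop_append_of_le_length hc
      have h2 : (argv.drop c ++ [a]).take (argv.length - c) = argv.drop c := by
        rw [List.take_append_of_le_length (by simp), List.take_of_length_le (by simp)]
      simp [chunksAux, h1, h2, List.drop_append_of_le_length (Nat.le_refl argv.length)]
  | c :: c' :: rest, hb => by
      have htake : ((argv ++ [a]).drop c).take (c' - c) = (argv.drop c).take (c' - c) := by
        rw [List.drop_append_of_le_length (hb c (by simp)),
            List.take_append_of_le_length (by simp; have := hb c' (by simp); omega)]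
      have htail := chunksAux_snoc_yes argv a (c' :: rest)
        (fun x hx => hb x (List.mem_cons_of_mem _ hx))
      simp only [List.cons_append] at htail ⊢
      simp only [chunksAux, htake]
      rw [htail]
      rfl

theorem fold_eq (p : String → Bool) (argv : List String) :
    argv.foldl (gaStep p) (0, [[]]) =
      ((gaCuts argv p).length,
        argv.take ((gaCuts argv p).headD argv.length) :: chunksAux argv (gaCuts argv p)) := by
  induction argv using List.reverseRecOn with
  | nil => rfl
  | append_singleton argv a ih =>
    have hb : ∀ x ∈ gaCuts argv p, x ≤ argv.length := fun x hx => le_of_lt (mem_gaCuts_lt hx)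
    rw [List.foldl_append, ih, List.foldl_cons, List.foldl_nil, gaCuts_snoc]
    simp only [gaStep]
    by_cases hp : p a = true
    · rw [if_pos hp, if_pos hp]
      simp only [Prod.mk.injEq]
      refine ⟨by simp, ?_⟩
      rw [modify_at_length _ _ _ _ (by simp [length_chunksAux])]
      rw [chunksAux_snoc_yes argv a _ hb]
      simp only [List.cons_append]
      congr 1
      rcases hc : gaCuts argv p with _ | ⟨c0, ct⟩
      · simp [List.take_append_of_le_length (Nat.le_refl argv.length)]
      · have hc0 : c0 ≤ argv.length := hb c0 (by rw [hc]; simp)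
        simp [List.take_append_of_le_length hc0]
    · rw [if_neg hp, if_neg hp, List.append_nil]
      simp only [Prod.mk.injEq]
      refine ⟨trivial, ?_⟩
      rcases hc : gaCuts argv p with _ | ⟨c0, ct⟩
      · simp [chunksAux, List.modify_cons, List.take_length]
      · have hb' : ∀ x ∈ c0 :: ct, x ≤ argv.length := hc ▸ hb
        have htail := chunksAux_snoc_no argv a (c0 :: ct) hb' (by simp)
        rw [htail, List.length_cons, List.modify_cons, if_neg (Nat.succ_ne_zero _)]
        congr 1
        rw [List.headD_cons, List.headD_cons,
            List.take_append_of_le_length (hb' c0 (by simp))]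

theorem chunksAux_zipmap (argv : List String) :
    ∀ (c : Nat) (cs : List Nat), (∀ x ∈ c :: cs, x ≤ argv.length) →
      chunksAux argv (c :: cs) =
        ((c :: cs).zip (cs ++ [argv.length])).map (fun q => (argv.drop q.1).take (q.2 - q.1))
  | c, [], hb => by
      have h : (argv.drop c).take (argv.length - c) = argv.drop c := by
        apply List.take_of_length_le; simp
      simp [chunksAux, h]
  | c, c' :: rest, hb => by
      have ih := chunksAux_zipmap argv c' rest (fun x hx => hb x (List.mem_cons_of_mem _ hx))
      simp only [chunksAux, List.cons_append, List.zip_cons_cons, List.map_cons]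
      rw [ih]

theorem core_eq (argv : List String) (p : String → Bool) :
    (let st := argv.foldl (gaStep p) (0, [[]]);
     let subs := st.2;
     if subs.length = 1 then [subs.getD 0 []]
     else if subs.length = 2 then [subs.getD 0 [] ++ subs.getD 1 []]
     else (subs.getD 0 [] ++ subs.getD 1 []) :: subs.drop 2) =
    (let cuts := gaCuts argv p;
     if cuts.length < 2 then [argv]
     else
       let starts := cuts.drop 1
       let ends := cuts.drop 2 ++ [argv.length]
       argv.take (starts.headD 0) :: (starts.zip ends).map (fun q => (argv.drop q.1).take (q.2 - q.1))) := by
  have hb : ∀ x ∈ gaCuts argv p, x ≤ argv.length := fun x hx => le_of_lt (mem_gaCuts_lt hx)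
  have hs := gaCuts_sorted argv p
  simp only [fold_eq]
  rcases hc : gaCuts argv p with _ | ⟨c0, cs⟩
  · simp [chunksAux, List.take_length, List.getD]
  · rw [hc] at hb hs
    rcases cs with _ | ⟨c1, rest⟩
    · simp [chunksAux, List.getD, List.take_append_drop]
    · have hlen : (List.take c0 argv :: chunksAux argv (c0 :: c1 :: rest)).length = rest.length + 3 := by
        simp [length_chunksAux]
      have h01 : c0 < c1 := (List.pairwise_cons.mp hs).1 c1 (by simp)
      have hhead : argv.take c0 ++ (argv.drop c0).take (c1 - c0) = argv.take c1 := by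
        rw [← List.take_add]
        congr 1
        omega
      have htail := chunksAux_zipmap argv c1 rest
        (fun x hx => hb x (List.mem_cons_of_mem _ hx))
      simp only [List.headD_cons]
      rw [hlen, if_neg (by omega), if_neg (by omega),
          if_neg (by simp only [List.length_cons]; omega)]
      show (argv.take c0 ++ (argv.drop c0).take (c1 - c0)) :: chunksAux argv (c1 :: rest) =
        argv.take c1 :: ((c1 :: rest).zip (rest ++ [argv.length])).map
          (fun q => (argv.drop q.1).take (q.2 - q.1))
      rw [hhead, htail]

-- ===== VERDICT (by name: the statement is the Claim_ definition above) =====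
theorem group_args_spec : Claim_equal_group_args := by
  intro argv modules _
  unfold Spec_group_args group_args group_args_alt
  exact core_eq argv (fun a => (PySem.Dict.ofList modules).keys.contains a)
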